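-- pv_equiv track=rewrite | github.com/swethatanamala/project_spoj | 22.STAMPS.py | number_of_friends
-- ===== SOURCE A (Python) =====
-- def number_of_friends(need, stamps):
--     stamps = sorted(stamps, reverse=True)
--     friends = 0
--     for stamp in stamps:
--         if need <= 0:
--             break
--         need -= stamp
--         friends += 1
--     return friends, need
-- ===== SOURCE B (Python) =====
-- def number_of_friends(need, stamps):
--     s = sorted(stamps, reverse=True)
--     prefix = [0]
--     total = 0
--     for x in s:
--         total += x
--         prefix.append(total)
--     k, hit = next(((i, p) for i, p in enumerate(prefix) if p >= need), (len(s), total))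
--     return k, need - hit
-- ===== Notes on version B (the rewrite author's own statement) =====
-- stated objective: alternative
-- what changed: Replaces the accumulate-and-break loop by precomputing a prefix-sum table of the descending-sorted stamps and then locating the first prefix that reaches need (with an explicit default when none does).
import Mathlib
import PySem

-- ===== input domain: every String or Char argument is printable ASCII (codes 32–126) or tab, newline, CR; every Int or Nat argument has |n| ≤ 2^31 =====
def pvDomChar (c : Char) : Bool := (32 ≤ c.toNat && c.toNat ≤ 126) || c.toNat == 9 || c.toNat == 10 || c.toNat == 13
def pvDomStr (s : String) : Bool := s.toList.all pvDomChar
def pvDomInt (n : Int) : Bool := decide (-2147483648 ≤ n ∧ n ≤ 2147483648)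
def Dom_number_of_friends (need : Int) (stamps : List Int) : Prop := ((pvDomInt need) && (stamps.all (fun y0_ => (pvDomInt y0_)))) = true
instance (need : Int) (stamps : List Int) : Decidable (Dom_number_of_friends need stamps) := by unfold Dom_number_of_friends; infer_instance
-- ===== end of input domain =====

-- B restructures A's accumulate-and-break loop into a precomputed prefix-sum table plus a
-- first-hit search (alternative decomposition, same return value).


-- ===== PORT A =====
-- the 'for stamp in stamps: if need <= 0: break; …' loop, state (friends, need)
def nofLoopA : List Int → Int → Int → Int × Int
  | [], friends, need => (friends, need)
  | stamp :: rest, friends, need =>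
    if need ≤ 0 then (friends, need)
    else nofLoopA rest (friends + 1) (need - stamp)

def number_of_friends (need : Int) (stamps : List Int) : Int × Int :=
  nofLoopA (PySem.List.sorted stamps (fun x => x) true) 0 need

-- ===== PORT B =====
def number_of_friends_alt (need : Int) (stamps : List Int) : Int × Int :=
  let s := PySem.List.sorted stamps (fun x => x) true
  -- prefix = [0]; total = 0; for x in s: total += x; prefix.append(total)
  let st := s.foldl (fun (st : List Int × Int) x => (st.1 ++ [st.2 + x], st.2 + x)) ([0], 0)
  -- next(((i, p) for i, p in enumerate(prefix) if p >= need), (len(s), total))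
  let kh := ((PySem.List.enumerate st.1 0).find? (fun ip => decide (need ≤ ip.2))).getD
      ((s.length : Int), st.2)
  (kh.1, need - kh.2)

-- ===== PRECONDITION & SPEC =====
def Spec_number_of_friends (need : Int) (stamps : List Int) (out : Int × Int) : Prop := out = number_of_friends_alt need stamps
instance (need : Int) (stamps : List Int) (out : Int × Int) : Decidable (Spec_number_of_friends need stamps out) := by unfold Spec_number_of_friends; infer_instance

-- ===== CLAIM (what is proved, stated in full; the proofs are below) =====
def Claim_equal_number_of_friends : Prop := ∀ (need : Int) (stamps : List Int), Dom_number_of_friends need stamps → Spec_number_of_friends need stamps (number_of_friends need stamps)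

-- ===== LEMMAS AND PROOFS =====

-- the common greedy recursion both programs compute
def nofG : Int → List Int → Int × Int
  | need, [] => (0, need)
  | need, x :: l =>
    if need ≤ 0 then (0, need)
    else ((nofG (need - x) l).1 + 1, (nofG (need - x) l).2)

theorem nofLoopA_eq_nofG (l : List Int) : ∀ (friends need : Int),
    nofLoopA l friends need = ((nofG need l).1 + friends, (nofG need l).2) := by
  induction l with
  | nil => intro friends need; simp [nofLoopA, nofG]
  | cons x t ih =>
    intro friends need
    by_cases h : need ≤ 0
    · simp [nofLoopA, nofG, h]
    · simp only [nofLoopA, nofG, h, if_false]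
      rw [ih]
      simp only [Prod.mk.injEq]
      exact ⟨by ring, trivial⟩

-- the exact prefix-sum list B builds
def pfxs : Int → List Int → List Int
  | t, [] => [t]
  | t, x :: l => t :: pfxs (t + x) l

theorem fold_pfxs (l : List Int) : ∀ (p : List Int) (t : Int),
    l.foldl (fun (st : List Int × Int) x => (st.1 ++ [st.2 + x], st.2 + x)) (p ++ [t], t)
      = (p ++ pfxs t l, t + l.sum) := by
  induction l with
  | nil => intro p t; simp [pfxs]
  | cons x t' ih =>
    intro p t
    simp only [List.foldl_cons]
    rw [ih (p ++ [t]) (t + x)]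
    simp [pfxs, List.append_assoc]
    ring

theorem pfxs_add (l : List Int) : ∀ (a t : Int),
    pfxs (a + t) l = (pfxs t l).map (a + ·) := by
  induction l with
  | nil => intro a t; simp [pfxs]
  | cons x t' ih =>
    intro a t
    simp only [pfxs, List.map_cons]
    congr 1
    rw [show a + t + x = a + (t + x) by ring, ih]

theorem find_shift (P : List Int) : ∀ (i need x : Int),
    (PySem.List.enumerate (P.map (x + ·)) (i + 1)).find? (fun ip => decide (need ≤ ip.2))
      = ((PySem.List.enumerate P i).find? (fun ip => decide (need - x ≤ ip.2))).map
          (fun ip => (ip.1 + 1, x + ip.2)) := by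
  induction P with
  | nil => intro i need x; simp [PySem.List.enumerate_nil]
  | cons p t ih =>
    intro i need x
    rw [List.map_cons, PySem.List.enumerate_cons, PySem.List.enumerate_cons,
        List.find?_cons, List.find?_cons]
    by_cases h : need - x ≤ p
    · rw [show decide (need ≤ x + p) = true from by simp; omega,
          show decide (need - x ≤ p) = true from by simp [h]]
      rfl
    · rw [show decide (need ≤ x + p) = false from by simp; omega,
          show decide (need - x ≤ p) = false from by simp [h]]
      exact ih (i + 1) need x

theorem bcore_eq_nofG (l : List Int) : ∀ (need : Int),
    (let kh := ((PySem.List.enumerate (pfxs 0 l) 0).find? (fun ip => decide (need ≤ ip.2))).getD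
        ((l.length : Int), l.sum)
     ((kh.1, need - kh.2) : Int × Int)) = nofG need l := by
  induction l with
  | nil =>
    intro need
    by_cases h : need ≤ 0 <;>
      simp [pfxs, PySem.List.enumerate_cons, PySem.List.enumerate_nil, h, nofG]
  | cons x t ih =>
    intro need
    have hpf : pfxs 0 (x :: t) = 0 :: (pfxs 0 t).map (x + ·) := by
      have h2 : pfxs x t = (pfxs 0 t).map (x + ·) := by simpa using pfxs_add t x 0
      simp [pfxs, h2]
    by_cases h : need ≤ 0
    · simp [hpf, PySem.List.enumerate_cons, h, nofG]
    · simp only [hpf, PySem.List.enumerate_cons, List.find?_cons, decide_eq_false h]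
      rw [find_shift (pfxs 0 t) 0 need x]
      have ihx := ih (need - x)
      simp only at ihx
      rw [nofG, if_neg h, ← ihx]
      cases hf : (PySem.List.enumerate (pfxs 0 t) 0).find? (fun ip => decide (need - x ≤ ip.2)) with
      | none =>
        simp only [Option.map_none, Option.getD_none, List.length_cons, List.sum_cons]
        simp only [Prod.mk.injEq]
        exact ⟨by push_cast; ring, by ring⟩
      | some jp =>
        simp only [Option.map_some, Option.getD_some]
        simp only [Prod.mk.injEq]
        exact ⟨trivial, by ring⟩

-- ===== VERDICT (by name: the statement is the Claim_ definition above) =====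
theorem number_of_friends_spec : Claim_equal_number_of_friends := by
  intro need stamps _
  unfold Spec_number_of_friends number_of_friends number_of_friends_alt
  have hfold := fold_pfxs (PySem.List.sorted stamps (fun x => x) true) [] 0
  simp only [List.nil_append] at hfold
  rw [nofLoopA_eq_nofG]
  rw [← bcore_eq_nofG (PySem.List.sorted stamps (fun x => x) true) need]
  simp only [hfold, Int.add_zero, Int.zero_add]
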